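-- pv_equiv track=rewrite | github.com/Enjef/Algo | 900 - 999/959 - Regions Cut By Slashes/959 - Regions Cut By Slashes.py | regionsBySlashes
-- ===== SOURCE A (Python) =====
-- from typing import List
--
-- def regionsBySlashes(grid: List[str]) -> int: # 40.07% 23.40%
--     def bfs(x, y):
--         if not (-1 < x < len(mat) and -1 < y < len(mat) and not mat[x][y]):
--             return
--         mat[x][y] = 1
--         for idx in range(4):
--             bfs(x+x_way[idx], y+y_way[idx])
--         return
--
--     mat = [[0]*3*len(grid) for _ in range(3*len(grid))]
--     for i in range(len(grid)):
--         for j in range(len(grid[0])):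
--             x, y = i*3, j*3
--             if grid[i][j] == '/':
--                 mat[x][y+2] = 1
--                 mat[x+1][y+1] = 1
--                 mat[x+2][y] = 1
--             elif grid[i][j] == '\\':
--                 mat[x][y] = 1
--                 mat[x+1][y+1] = 1
--                 mat[x+2][y+2] = 1
--                 j += 1
--     out = 0
--     x_way = [-1, 0, 0, 1]
--     y_way = [0, -1, 1, 0]
--     for i in range(len(mat)):
--         for j in range(len(mat[0])):
--             if not mat[i][j]:
--                 bfs(i, j)
--                 out += 1
--     return out
-- ===== SOURCE B (Python) =====
-- def regionsBySlashes(grid):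
--     # Blocked sub-cells come from a closed-form per-cell formula (comprehension) instead of
--     # imperative carving, and regions are flooded with an explicit-stack DFS instead of recursion.
--     if not grid:
--         return 0
--     n = len(grid)
--     m = len(grid[0])
--     N = 3 * n
--
--     def blocked(x, y):
--         j = y // 3
--         if j >= m:
--             return 0
--         c = grid[x // 3][j]
--         if c == '/':
--             return 1 if x % 3 + y % 3 == 2 else 0
--         if c == '\\':
--             return 1 if x % 3 == y % 3 else 0
--         return 0
--
--     mat = [[blocked(x, y) for y in range(N)] for x in range(N)]
--     out = 0
--     for i in range(N):
--         for j in range(N):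
--             if not mat[i][j]:
--                 out += 1
--                 stack = [(i, j)]
--                 while stack:
--                     x, y = stack.pop()
--                     if 0 <= x < N and 0 <= y < N and not mat[x][y]:
--                         mat[x][y] = 1
--                         stack.append((x + 1, y))
--                         stack.append((x, y + 1))
--                         stack.append((x, y - 1))
--                         stack.append((x - 1, y))
--     return out
-- ===== Notes on version B (the rewrite author's own statement) =====
-- stated objective: alternative
-- what changed: B computes the blocked sub-cells by a closed-form per-cell formula in a comprehension instead of A's imperative carving writes, and floods each region with an explicit-stack DFS instead of A's recursive bfs (which also avoids Python's recursion limit).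
import Mathlib
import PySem

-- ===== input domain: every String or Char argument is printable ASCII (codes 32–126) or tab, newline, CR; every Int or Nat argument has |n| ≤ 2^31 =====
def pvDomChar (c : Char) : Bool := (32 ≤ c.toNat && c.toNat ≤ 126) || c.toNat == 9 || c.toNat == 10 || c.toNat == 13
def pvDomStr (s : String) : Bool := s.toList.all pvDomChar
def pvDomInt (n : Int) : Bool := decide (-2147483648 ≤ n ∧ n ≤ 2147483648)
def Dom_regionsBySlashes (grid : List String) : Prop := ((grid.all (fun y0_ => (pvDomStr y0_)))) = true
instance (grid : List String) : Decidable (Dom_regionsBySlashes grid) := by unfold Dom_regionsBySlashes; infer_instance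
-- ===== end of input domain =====

-- B computes the blocked sub-cells of the 3n×3n matrix by a closed-form per-cell formula in a
-- comprehension instead of A's imperative carving writes, and floods each region with an
-- explicit-stack DFS instead of A's recursive bfs (alternative decomposition). Return value only.

-- ===== PORT A =====
-- mat[x][y] read (on admitted runs the index is always in range)
def mget0 (mat : List (List Int)) (x y : Nat) : Int := (mat.getD x []).getD y 0
-- mat[x][y] = 1 write (List.set is a no-op out of range; admitted runs stay in range)
def mset1 (mat : List (List Int)) (x y : Nat) : List (List Int) :=
  mat.set x ((mat.getD x []).set y 1)
-- grid[i][j] (in range on inputs admitted by Pre_)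
def chAt (grid : List String) (i j : Nat) : Char := ((grid.getD i "").toList).getD j ' '

-- body of A's building loop for one cell; A's dead `j += 1` in the '\\' branch is omitted
-- (reassigning the loop variable has no effect in Python)
def carveCell (c : Char) (x y : Nat) (mat : List (List Int)) : List (List Int) :=
  if c = '/' then mset1 (mset1 (mset1 mat x (y + 2)) (x + 1) (y + 1)) (x + 2) y
  else if c = '\\' then mset1 (mset1 (mset1 mat x y) (x + 1) (y + 1)) (x + 2) (y + 2)
  else mat

-- A's inner building loop `for j in range(len(grid[0]))` for row i
def carveRow (grid : List String) (i : Nat) (mat : List (List Int)) : List (List Int) :=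
  (List.range ((grid.headD "").toList.length)).foldl
    (fun mat j => carveCell (chAt grid i j) (3 * i) (3 * j) mat) mat

-- A's matrix after the two building loops, starting from the 3n×3n zero matrix
def carve (grid : List String) : List (List Int) :=
  (List.range grid.length).foldl (fun mat i => carveRow grid i mat)
    (List.replicate (3 * grid.length) (List.replicate (3 * grid.length) (0 : Int)))

-- A's recursive bfs; the fuel argument only makes the recursion structural (one unit per
-- call; a passed guard marks a cell, so the call site's fuel is never exhausted on a run
-- the differential test or the proof looks at)
def bfsA : Nat → List (List Int) → Int → Int → List (List Int)
  | 0, mat, _, _ => mat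
  | f + 1, mat, x, y =>
    if -1 < x ∧ x < (mat.length : Int) ∧ -1 < y ∧ y < (mat.length : Int) ∧
        mget0 mat x.toNat y.toNat = 0 then
      let m0 := mset1 mat x.toNat y.toNat
      let m1 := bfsA f m0 (x - 1) y
      let m2 := bfsA f m1 x (y - 1)
      let m3 := bfsA f m2 x (y + 1)
      bfsA f m3 (x + 1) y
    else mat

def regionsBySlashes (grid : List String) : Int :=
  let mat0 := carve grid
  let fuel := 3 * grid.length * (3 * grid.length) + 1
  ((List.range mat0.length).foldl (fun st i =>
      (List.range ((st.1.headD []).length)).foldl (fun st j =>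
        if mget0 st.1 i j = 0 then (bfsA fuel st.1 (i : Int) (j : Int), st.2 + 1) else st) st)
    (mat0, (0 : Int))).2

-- ===== PORT B =====
-- number of free (0) entries; fillStack's termination measure
def zerosM (mat : List (List Int)) : Nat := mat.flatten.count 0

theorem count0_set1_lt (l : List Int) (y : Nat) (hy : y < l.length) (h0 : l[y] = 0) :
    (l.set y 1).count 0 < l.count 0 := by
  rw [List.count_set hy]
  have hmem : (0 : Int) ∈ l := h0 ▸ List.getElem_mem hy
  have : 0 < l.count 0 := List.count_pos_iff.mpr hmem
  simp [h0]
  omega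

theorem zerosM_mset1_lt (mat : List (List Int)) (x y : Nat)
    (hx : x < mat.length) (h0 : (mat.getD x []).getD y 1 = 0) :
    zerosM (mset1 mat x y) < zerosM mat := by
  have hrow : mat.getD x [] = mat[x] := List.getD_eq_getElem mat [] hx
  by_cases hy : y < (mat[x]).length
  · have h0' : (mat[x])[y] = 0 := by
      rw [hrow, List.getD_eq_getElem _ _ hy] at h0; exact h0
    unfold zerosM mset1
    rw [hrow, List.set_eq_take_cons_drop _ hx]
    conv_rhs => rw [← List.take_append_drop x mat, List.drop_eq_getElem_cons hx]
    rw [List.flatten_append, List.flatten_cons, List.flatten_append, List.flatten_cons,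
        List.count_append, List.count_append, List.count_append, List.count_append]
    have := count0_set1_lt mat[x] y hy h0'
    omega
  · exfalso
    rw [hrow, List.getD_eq_default _ _ (by omega)] at h0
    exact one_ne_zero h0

-- B's closed-form `blocked(x, y)` (0/1)
def blockedB (grid : List String) (m : Nat) (x y : Nat) : Int :=
  let j := y / 3
  if m ≤ j then 0
  else
    let c := chAt grid (x / 3) j
    if c = '/' then (if x % 3 + y % 3 = 2 then 1 else 0)
    else if c = '\\' then (if x % 3 = y % 3 then 1 else 0)
    else 0

-- B's `while stack:` loop; Source B's bound N always equals mat.length at a call, and the read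
-- `mat[x][y]` is transcribed with default 1 (never consulted on a real run, where every row
-- has length N) so that a passed guard provably shrinks the termination measure
def fillStack : List (List Int) → List (Int × Int) → List (List Int)
  | mat, [] => mat
  | mat, (x, y) :: s =>
    if h : 0 ≤ x ∧ x < (mat.length : Int) ∧ 0 ≤ y ∧ y < (mat.length : Int) ∧
        (mat.getD x.toNat []).getD y.toNat 1 = 0 then
      fillStack (mset1 mat x.toNat y.toNat)
        ((x - 1, y) :: (x, y - 1) :: (x, y + 1) :: (x + 1, y) :: s)
    else fillStack mat s
  termination_by mat s => 5 * zerosM mat + s.length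
  decreasing_by
  · have hx : x.toNat < mat.length := by omega
    have := zerosM_mset1_lt mat x.toNat y.toNat hx h.2.2.2.2
    simp only [List.length_cons]
    omega
  · simp only [List.length_cons]; omega

def regionsBySlashes_alt (grid : List String) : Int :=
  if grid = [] then 0
  else
    let m := (grid.headD "").toList.length
    let N := 3 * grid.length
    let mat0 := (List.range N).map (fun x => (List.range N).map (fun y => blockedB grid m x y))
    ((List.range N).foldl (fun st i =>
        (List.range N).foldl (fun st j =>
          if mget0 st.1 i j = 0 then (fillStack st.1 [((i : Int), (j : Int))], st.2 + 1) else st) st)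
      (mat0, (0 : Int))).2

-- ===== PRECONDITION & SPEC =====
-- Pre_ is exactly where the Python A returns: A raises IndexError iff some row is shorter
-- than row 0 (the read grid[i][j]) or a slash occurs in a column ≥ len(grid) (the write
-- mat[x][y+..] then lands outside the 3n×3n matrix).
def Pre_regionsBySlashes (grid : List String) : Prop :=
  ∀ s ∈ grid, (grid.headD "").toList.length ≤ s.toList.length ∧
    ∀ j : Nat, j < (grid.headD "").toList.length →
      (s.toList.getD j ' ' = '/' ∨ s.toList.getD j ' ' = '\\') → j < grid.length
instance (grid : List String) : Decidable (Pre_regionsBySlashes grid) := by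
  unfold Pre_regionsBySlashes; infer_instance

def pvWitness_regionsBySlashes : List String := ["/\\", " /"]

def Spec_regionsBySlashes (grid : List String) (out : Int) : Prop := out = regionsBySlashes_alt grid
instance (grid : List String) (out : Int) : Decidable (Spec_regionsBySlashes grid out) := by
  unfold Spec_regionsBySlashes; infer_instance

-- ===== CLAIM (what is proved, stated in full; the proofs are below) =====
def Claim_equal_regionsBySlashes : Prop := ∀ (grid : List String), Dom_regionsBySlashes grid → Pre_regionsBySlashes grid → Spec_regionsBySlashes grid (regionsBySlashes grid)

-- ===== LEMMAS AND PROOFS =====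

def ShapeN (mat : List (List Int)) (N : Nat) : Prop :=
  mat.length = N ∧ ∀ r ∈ mat, r.length = N

theorem mset1_of_ge (mat : List (List Int)) {x : Nat} (y : Nat) (hx : mat.length ≤ x) :
    mset1 mat x y = mat := by
  simp [mset1, List.set_eq_of_length_le hx]

theorem shape_mset1 {mat : List (List Int)} {N : Nat} (h : ShapeN mat N) (x y : Nat) :
    ShapeN (mset1 mat x y) N := by
  by_cases hx : x < mat.length
  · obtain ⟨h1, h2⟩ := h
    refine ⟨by simp [mset1, h1], ?_⟩
    intro r hr
    rcases List.mem_or_eq_of_mem_set hr with hr | hr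
    · exact h2 r hr
    · subst hr
      rw [List.getD_eq_getElem _ _ hx]
      simp [h2 _ (List.getElem_mem hx)]
  · rw [mset1_of_ge mat y (by omega)]; exact h

theorem getD_set_ne {α : Type} (l : List α) {i j : Nat} (a : α) (d : α) (h : i ≠ j) :
    (l.set i a).getD j d = l.getD j d := by
  simp [List.getD, List.getElem?_set_ne h]

theorem getD_set_self {α : Type} (l : List α) {i : Nat} (a : α) (d : α) (h : i < l.length) :
    (l.set i a).getD i d = a := by
  simp [List.getD, h]

-- frame: a write at (x, y) does not change a read at a different coordinate

theorem mget0_mset1_ne (mat : List (List Int)) {x y u v : Nat} (h : x ≠ u ∨ y ≠ v) :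
    mget0 (mset1 mat x y) u v = mget0 mat u v := by
  by_cases hx : x < mat.length
  · unfold mget0 mset1
    rcases eq_or_ne x u with rfl | hxu
    · have hy : y ≠ v := by tauto
      rw [getD_set_self _ _ _ hx, getD_set_ne _ _ _ hy]
    · rw [getD_set_ne _ _ _ hxu]
  · rw [mset1_of_ge mat y (by omega)]

-- write: reading back an in-range write gives 1

theorem mget0_mset1_self (mat : List (List Int)) {x y : Nat}
    (hx : x < mat.length) (hy : y < (mat.getD x []).length) :
    mget0 (mset1 mat x y) x y = 1 := by
  unfold mget0 mset1
  rw [getD_set_self _ _ _ hx, getD_set_self _ _ _ (by simpa using hy)]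

theorem count0_set1_le (l : List Int) (y : Nat) :
    (l.set y 1).count 0 ≤ l.count 0 := by
  by_cases hy : y < l.length
  · rw [List.count_set hy]; simp
  · rw [List.set_eq_of_length_le (by omega)]

theorem zerosM_mset1_le (mat : List (List Int)) (x y : Nat) :
    zerosM (mset1 mat x y) ≤ zerosM mat := by
  by_cases hx : x < mat.length
  · have hrow : mat.getD x [] = mat[x] := List.getD_eq_getElem mat [] hx
    unfold zerosM mset1
    rw [hrow, List.set_eq_take_cons_drop _ hx]
    conv_rhs => rw [← List.take_append_drop x mat, List.drop_eq_getElem_cons hx]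
    rw [List.flatten_append, List.flatten_cons, List.flatten_append, List.flatten_cons,
        List.count_append, List.count_append, List.count_append, List.count_append]
    have := count0_set1_le mat[x] y
    omega
  · rw [mset1_of_ge mat y (by omega)]

theorem zerosM_bfsA_le (f : Nat) (mat : List (List Int)) (x y : Int) :
    zerosM (bfsA f mat x y) ≤ zerosM mat := by
  induction f generalizing mat x y with
  | zero => simp [bfsA]
  | succ f ih =>
    rw [bfsA]
    split
    · exact le_trans (ih _ _ _) (le_trans (ih _ _ _) (le_trans (ih _ _ _)
        (le_trans (ih _ _ _) (zerosM_mset1_le _ _ _))))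
    · exact le_refl _

theorem shape_bfsA {N : Nat} (f : Nat) {mat : List (List Int)} (h : ShapeN mat N) (x y : Int) :
    ShapeN (bfsA f mat x y) N := by
  induction f generalizing mat x y with
  | zero => simpa [bfsA]
  | succ f ih =>
    rw [bfsA]
    split
    · exact ih (ih (ih (ih (shape_mset1 h _ _) _ _) _ _) _ _) _ _
    · exact h

-- under the shape invariant A's guard (default-0 read) and B's guard (default-1 read) agree

theorem guard_eq {N : Nat} {mat : List (List Int)} (h : ShapeN mat N) (x y : Int)
    (hx : 0 ≤ x) (hx2 : x < (mat.length : Int)) (hy : 0 ≤ y) (hy2 : y < (mat.length : Int)) :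
    (mat.getD x.toNat []).getD y.toNat 1 = (mat.getD x.toNat []).getD y.toNat 0 := by
  obtain ⟨h1, h2⟩ := h
  have hx' : x.toNat < mat.length := by omega
  have hrl : (mat.getD x.toNat []).length = N := by
    rw [List.getD_eq_getElem _ _ hx']
    exact h2 _ (List.getElem_mem hx')
  have hy' : y.toNat < (mat.getD x.toNat []).length := by omega
  rw [List.getD_eq_getElem _ _ hy', List.getD_eq_getElem _ _ hy']

-- the core simulation: popping (x, y) with enough fuel equals running A's recursive bfs there

theorem fillStack_bfsA {N : Nat} (f : Nat) (mat : List (List Int)) (x y : Int)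
    (s : List (Int × Int)) (hs : ShapeN mat N) (hf : zerosM mat < f) :
    fillStack mat ((x, y) :: s) = fillStack (bfsA f mat x y) s := by
  induction f generalizing mat x y s with
  | zero => omega
  | succ f ih =>
    by_cases hg : -1 < x ∧ x < (mat.length : Int) ∧ -1 < y ∧ y < (mat.length : Int) ∧
        mget0 mat x.toNat y.toNat = 0
    · obtain ⟨g1, g2, g3, g4, g5⟩ := hg
      have hgB : 0 ≤ x ∧ x < (mat.length : Int) ∧ 0 ≤ y ∧ y < (mat.length : Int) ∧
          (mat.getD x.toNat []).getD y.toNat 1 = 0 := by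
        refine ⟨by omega, g2, by omega, g4, ?_⟩
        rw [guard_eq hs x y (by omega) g2 (by omega) g4]
        exact g5
      rw [fillStack]
      rw [dif_pos hgB]
      have hm0lt : zerosM (mset1 mat x.toNat y.toNat) < zerosM mat :=
        zerosM_mset1_lt _ _ _ (by omega) hgB.2.2.2.2
      have hs0 : ShapeN (mset1 mat x.toNat y.toNat) N := shape_mset1 hs _ _
      have hs1 := shape_bfsA f hs0 (x - 1) y
      have hs2 := shape_bfsA f hs1 x (y - 1)
      have hs3 := shape_bfsA f hs2 x (y + 1)
      have hz1 := zerosM_bfsA_le f (mset1 mat x.toNat y.toNat) (x - 1) y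
      have hz2 := zerosM_bfsA_le f (bfsA f (mset1 mat x.toNat y.toNat) (x - 1) y) x (y - 1)
      have hz3 := zerosM_bfsA_le f (bfsA f (bfsA f (mset1 mat x.toNat y.toNat) (x - 1) y) x (y - 1)) x (y + 1)
      rw [ih _ (x - 1) y _ hs0 (by omega)]
      rw [ih _ x (y - 1) _ hs1 (by omega)]
      rw [ih _ x (y + 1) _ hs2 (by omega)]
      rw [ih _ (x + 1) y _ hs3 (by omega)]
      rw [bfsA, if_pos ⟨g1, g2, g3, g4, g5⟩]
    · have hgB : ¬ (0 ≤ x ∧ x < (mat.length : Int) ∧ 0 ≤ y ∧ y < (mat.length : Int) ∧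
          (mat.getD x.toNat []).getD y.toNat 1 = 0) := by
        intro ⟨b1, b2, b3, b4, b5⟩
        apply hg
        refine ⟨by omega, b2, by omega, b4, ?_⟩
        rw [show mget0 mat x.toNat y.toNat = (mat.getD x.toNat []).getD y.toNat 0 from rfl,
            ← guard_eq hs x y b1 b2 b3 b4]
        exact b5
      rw [fillStack, dif_neg hgB, bfsA, if_neg hg]

abbrev Fblk (c : Char) (u v : Nat) : Prop :=
  (c = '/' ∧ u % 3 + v % 3 = 2) ∨ (c = '\\' ∧ u % 3 = v % 3)

theorem rowlen {mat : List (List Int)} {N : Nat} (h : ShapeN mat N) {x : Nat} (hx : x < N) :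
    (mat.getD x []).length = N := by
  obtain ⟨h1, h2⟩ := h
  rw [List.getD_eq_getElem _ _ (by omega)]
  exact h2 _ (List.getElem_mem (by omega))

theorem shape_carveCell {mat : List (List Int)} {N : Nat} (h : ShapeN mat N) (c : Char)
    (x y : Nat) : ShapeN (carveCell c x y mat) N := by
  unfold carveCell
  split_ifs <;> first | exact shape_mset1 (shape_mset1 (shape_mset1 h _ _) _ _) _ _ | exact h

theorem mget0_carveCell {mat : List (List Int)} {N : Nat} (h : ShapeN mat N) (c : Char)
    {i j u v : Nat} (hu : u < N) (hv : v < N) :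
    mget0 (carveCell c (3 * i) (3 * j) mat) u v =
      if u / 3 = i ∧ v / 3 = j ∧ Fblk c u v then 1 else mget0 mat u v := by
  have hlen : mat.length = N := h.1
  unfold carveCell
  by_cases hc1 : c = '/'
  · subst hc1
    rw [if_pos (rfl : ('/' : Char) = '/')]
    by_cases hcond : u / 3 = i ∧ v / 3 = j ∧ u % 3 + v % 3 = 2
    · obtain ⟨hui, hvj, hsum⟩ := hcond
      rw [if_pos (show _ ∧ _ ∧ Fblk '/' u v from ⟨hui, hvj, Or.inl ⟨rfl, hsum⟩⟩)]
      have h3 : (u % 3 = 0 ∧ v % 3 = 2) ∨ (u % 3 = 1 ∧ v % 3 = 1) ∨ (u % 3 = 2 ∧ v % 3 = 0) := by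
        omega
      have hs1 := shape_mset1 h (3 * i) (3 * j + 2)
      have hs2 := shape_mset1 hs1 (3 * i + 1) (3 * j + 1)
      rcases h3 with ⟨ha, hb⟩ | ⟨ha, hb⟩ | ⟨ha, hb⟩
      · rw [mget0_mset1_ne _ (by omega), mget0_mset1_ne _ (by omega),
            show 3 * i = u from by omega, show 3 * j + 2 = v from by omega]
        exact mget0_mset1_self _ (by omega) (by rw [rowlen h hu]; omega)
      · rw [mget0_mset1_ne _ (by omega),
            show 3 * i + 1 = u from by omega, show 3 * j + 1 = v from by omega]
        exact mget0_mset1_self _ (by rw [hs1.1]; omega) (by rw [rowlen hs1 hu]; omega)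
      · rw [show 3 * i + 2 = u from by omega, show (3 : Nat) * j = v from by omega]
        exact mget0_mset1_self _
          (by rw [(shape_mset1 (shape_mset1 h _ _) _ _ : ShapeN _ N).1]; omega)
          (by rw [rowlen (shape_mset1 (shape_mset1 h _ _) _ _ : ShapeN _ N) hu]; omega)
    · rw [if_neg (by simp only [Fblk]; tauto)]
      rw [mget0_mset1_ne _ (by omega), mget0_mset1_ne _ (by omega), mget0_mset1_ne _ (by omega)]
  · by_cases hc2 : c = '\\'
    · subst hc2
      rw [if_neg (by decide : ¬ (('\\' : Char) = '/')), if_pos (rfl : ('\\' : Char) = '\\')]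
      by_cases hcond : u / 3 = i ∧ v / 3 = j ∧ u % 3 = v % 3
      · obtain ⟨hui, hvj, hsum⟩ := hcond
        rw [if_pos (show _ ∧ _ ∧ Fblk '\\' u v from ⟨hui, hvj, Or.inr ⟨rfl, hsum⟩⟩)]
        have h3 : (u % 3 = 0 ∧ v % 3 = 0) ∨ (u % 3 = 1 ∧ v % 3 = 1) ∨ (u % 3 = 2 ∧ v % 3 = 2) := by
          omega
        have hs1 := shape_mset1 h (3 * i) (3 * j)
        have hs2 := shape_mset1 hs1 (3 * i + 1) (3 * j + 1)
        rcases h3 with ⟨ha, hb⟩ | ⟨ha, hb⟩ | ⟨ha, hb⟩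
        · rw [mget0_mset1_ne _ (by omega), mget0_mset1_ne _ (by omega),
              show 3 * i = u from by omega, show (3 : Nat) * j = v from by omega]
          exact mget0_mset1_self _ (by omega) (by rw [rowlen h hu]; omega)
        · rw [mget0_mset1_ne _ (by omega),
              show 3 * i + 1 = u from by omega, show 3 * j + 1 = v from by omega]
          exact mget0_mset1_self _ (by rw [hs1.1]; omega) (by rw [rowlen hs1 hu]; omega)
        · rw [show 3 * i + 2 = u from by omega, show 3 * j + 2 = v from by omega]
          exact mget0_mset1_self _ (by rw [hs2.1]; omega) (by rw [rowlen hs2 hu]; omega)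
      · rw [if_neg (by simp only [Fblk]; tauto)]
        rw [mget0_mset1_ne _ (by omega), mget0_mset1_ne _ (by omega), mget0_mset1_ne _ (by omega)]
    · rw [if_neg hc1, if_neg hc2, if_neg (by simp only [Fblk]; tauto)]

theorem shape_carveRowFold (grid : List String) (i : Nat) {N : Nat} :
    ∀ (m : Nat) {mat : List (List Int)}, ShapeN mat N →
    ShapeN ((List.range m).foldl
      (fun mat j => carveCell (chAt grid i j) (3 * i) (3 * j) mat) mat) N := by
  intro m
  induction m with
  | zero => intro mat h; simpa
  | succ m ih =>
    intro mat h
    rw [List.range_succ, List.foldl_append]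
    exact shape_carveCell (ih h) _ _ _

theorem mget0_carveRowFold (grid : List String) (i : Nat) {N : Nat} {u v : Nat}
    (hu : u < N) (hv : v < N) :
    ∀ (m : Nat) {mat : List (List Int)}, ShapeN mat N →
    mget0 ((List.range m).foldl
        (fun mat j => carveCell (chAt grid i j) (3 * i) (3 * j) mat) mat) u v =
      if u / 3 = i ∧ v / 3 < m ∧ Fblk (chAt grid i (v / 3)) u v then 1 else mget0 mat u v := by
  intro m
  induction m with
  | zero => intro mat h; rw [if_neg (by omega)]; rfl
  | succ m ih =>
    intro mat h
    rw [List.range_succ, List.foldl_append, List.foldl_cons, List.foldl_nil,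
        mget0_carveCell (shape_carveRowFold grid i m h) _ hu hv, ih h]
    by_cases hvm : v / 3 = m
    · rw [← hvm]
      by_cases hrest : u / 3 = i ∧ Fblk (chAt grid i (v / 3)) u v
      · rw [if_pos ⟨hrest.1, rfl, hrest.2⟩, if_pos ⟨hrest.1, by omega, hrest.2⟩]
      · rw [if_neg (by tauto), if_neg (by omega), if_neg (by tauto)]
    · rw [if_neg (by tauto)]
      by_cases hrest : u / 3 = i ∧ v / 3 < m ∧ Fblk (chAt grid i (v / 3)) u v
      · rw [if_pos hrest, if_pos ⟨hrest.1, by omega, hrest.2.2⟩]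
      · rw [if_neg hrest, if_neg (by intro ⟨a, b, c⟩; exact hrest ⟨a, by omega, c⟩)]

theorem shape_carveFold (grid : List String) {N : Nat} :
    ∀ (k : Nat) {mat : List (List Int)}, ShapeN mat N →
    ShapeN ((List.range k).foldl (fun mat i => carveRow grid i mat) mat) N := by
  intro k
  induction k with
  | zero => intro mat h; simpa
  | succ k ih =>
    intro mat h
    rw [List.range_succ, List.foldl_append, List.foldl_cons, List.foldl_nil]
    exact shape_carveRowFold grid k _ (ih h)

theorem mget0_carveFold (grid : List String) {N : Nat} {u v : Nat} (hu : u < N) (hv : v < N) :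
    ∀ (k : Nat) {mat : List (List Int)}, ShapeN mat N →
    mget0 ((List.range k).foldl (fun mat i => carveRow grid i mat) mat) u v =
      if u / 3 < k ∧ v / 3 < (grid.headD "").toList.length ∧
          Fblk (chAt grid (u / 3) (v / 3)) u v then 1 else mget0 mat u v := by
  intro k
  induction k with
  | zero => intro mat h; rw [if_neg (by omega)]; rfl
  | succ k ih =>
    intro mat h
    rw [List.range_succ, List.foldl_append, List.foldl_cons, List.foldl_nil]
    rw [show carveRow grid k ((List.range k).foldl (fun mat i => carveRow grid i mat) mat) =
        (List.range ((grid.headD "").toList.length)).foldl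
          (fun mat j => carveCell (chAt grid k j) (3 * k) (3 * j) mat)
          ((List.range k).foldl (fun mat i => carveRow grid i mat) mat) from rfl]
    rw [mget0_carveRowFold grid k hu hv _ (shape_carveFold grid k h), ih h]
    by_cases huk : u / 3 = k
    · rw [← huk]
      by_cases hrest : v / 3 < (grid.headD "").toList.length ∧ Fblk (chAt grid (u / 3) (v / 3)) u v
      · rw [if_pos ⟨rfl, hrest.1, hrest.2⟩, if_pos ⟨by omega, hrest.1, hrest.2⟩]
      · rw [if_neg (by tauto), if_neg (by omega), if_neg (by tauto)]
    · rw [if_neg (by tauto)]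
      by_cases hrest : u / 3 < k ∧ v / 3 < (grid.headD "").toList.length ∧
          Fblk (chAt grid (u / 3) (v / 3)) u v
      · rw [if_pos hrest, if_pos ⟨by omega, hrest.2⟩]
      · rw [if_neg hrest, if_neg (by intro ⟨a, b, c⟩; exact hrest ⟨by omega, b, c⟩)]

theorem shape_replicate0 (N : Nat) :
    ShapeN (List.replicate N (List.replicate N (0 : Int))) N := by
  constructor
  · simp
  · intro r hr
    rw [List.eq_of_mem_replicate hr]
    simp

theorem mget0_replicate0 (N u v : Nat) :
    mget0 (List.replicate N (List.replicate N (0 : Int))) u v = 0 := by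
  simp [mget0, List.getD, List.getElem?_replicate]
  split <;> simp

theorem mget0_carve (grid : List String) {u v : Nat}
    (hu : u < 3 * grid.length) (hv : v < 3 * grid.length) :
    mget0 (carve grid) u v = blockedB grid ((grid.headD "").toList.length) u v := by
  unfold carve
  rw [mget0_carveFold grid hu hv grid.length (shape_replicate0 _), mget0_replicate0]
  unfold blockedB
  dsimp only
  have hu3 : u / 3 < grid.length := by omega
  split_ifs with hA hB hC hD hE hF hG <;> try rfl
  all_goals simp only [Fblk] at hA
  all_goals
    first
    | (exfalso; rcases hA with ⟨h1, h2, (⟨hc, hn⟩ | ⟨hc, hn⟩)⟩ <;> simp_all <;> omega)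
    | (exfalso; apply hA; refine ⟨hu3, by omega, ?_⟩; tauto)

theorem shape_carve (grid : List String) : ShapeN (carve grid) (3 * grid.length) :=
  shape_carveFold grid grid.length (shape_replicate0 _)

-- A's carved matrix IS B's comprehension matrix

theorem carve_eq_map (grid : List String) :
    carve grid = (List.range (3 * grid.length)).map (fun x =>
      (List.range (3 * grid.length)).map (fun y =>
        blockedB grid ((grid.headD "").toList.length) x y)) := by
  have hs := shape_carve grid
  apply List.ext_getElem
  · simp [hs.1]
  · intro u h1 h2
    apply List.ext_getElem
    · simp [hs.2 _ (List.getElem_mem h1)]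
    · intro v h3 h4
      have hu : u < 3 * grid.length := by simpa [hs.1] using h1
      have hv : v < 3 * grid.length := by
        have := hs.2 _ (List.getElem_mem h1); omega
      have := mget0_carve grid hu hv
      rw [show mget0 (carve grid) u v = ((carve grid)[u]).getD v 0 from by
            rw [mget0, List.getD_eq_getElem _ _ h1],
          List.getD_eq_getElem _ _ h3] at this
      simp only [List.getElem_map, List.getElem_range]
      exact this

theorem headD_len {mat : List (List Int)} {N : Nat} (h : ShapeN mat N) (hN : 0 < N) :
    (mat.headD []).length = N := by
  rcases mat with _ | ⟨r, t⟩
  · simp [ShapeN] at h; omega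
  · exact h.2 r (by simp)

theorem zerosM_le_sq {mat : List (List Int)} {N : Nat} (h : ShapeN mat N) :
    zerosM mat ≤ N * N := by
  have h1 : zerosM mat ≤ mat.flatten.length := List.count_le_length
  have h2 : mat.flatten.length = N * N := by
    rw [List.length_flatten]
    have : mat.map List.length = mat.map (fun _ => N) :=
      List.map_congr_left (fun r hr => h.2 r hr)
    rw [this, List.map_const', List.sum_replicate, smul_eq_mul, h.1]
  omega

-- one seed of the counting loop: B's stack run equals A's recursive bfs

theorem seed_eq {N : Nat} {mat : List (List Int)} (h : ShapeN mat N) (x y : Int) :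
    fillStack mat [(x, y)] = bfsA (N * N + 1) mat x y := by
  rw [fillStack_bfsA (N * N + 1) mat x y [] h (by have := zerosM_le_sq h; omega)]
  rw [fillStack]

-- the inner counting loop, A's step vs B's step

theorem innerCount_eq {N : Nat} (i : Nat) (js : List Nat) :
    ∀ (mat : List (List Int)) (out : Int), ShapeN mat N →
    (js.foldl (fun st j =>
        if mget0 st.1 i j = 0 then (bfsA (N * N + 1) st.1 (i : Int) (j : Int), st.2 + 1) else st)
      (mat, out)) =
    (js.foldl (fun st j =>
        if mget0 st.1 i j = 0 then (fillStack st.1 [((i : Int), (j : Int))], st.2 + 1) else st)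
      (mat, out)) ∧
    ShapeN ((js.foldl (fun st j =>
        if mget0 st.1 i j = 0 then (bfsA (N * N + 1) st.1 (i : Int) (j : Int), st.2 + 1) else st)
      (mat, out)).1) N := by
  induction js with
  | nil => intro mat out h; exact ⟨rfl, h⟩
  | cons j t ih =>
    intro mat out h
    simp only [List.foldl_cons]
    by_cases hg : mget0 mat i j = 0
    · rw [if_pos hg, if_pos hg, seed_eq h]
      exact ih _ _ (shape_bfsA _ h _ _)
    · rw [if_neg hg, if_neg hg]
      exact ih _ _ h

-- the full counting loop

theorem outerCount_eq {N : Nat} (hN : 0 < N) (is : List Nat) :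
    ∀ (mat : List (List Int)) (out : Int), ShapeN mat N →
    (is.foldl (fun st i =>
        (List.range ((st.1.headD []).length)).foldl (fun st j =>
          if mget0 st.1 i j = 0 then (bfsA (N * N + 1) st.1 (i : Int) (j : Int), st.2 + 1) else st) st)
      (mat, out)) =
    (is.foldl (fun st i =>
        (List.range N).foldl (fun st j =>
          if mget0 st.1 i j = 0 then (fillStack st.1 [((i : Int), (j : Int))], st.2 + 1) else st) st)
      (mat, out)) := by
  induction is with
  | nil => intro mat out h; rfl
  | cons i t ih =>
    intro mat out h
    simp only [List.foldl_cons]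
    rw [headD_len h hN]
    obtain ⟨heq, hsh⟩ := innerCount_eq i (List.range N) mat out h
    rw [← heq, ih _ _ hsh]

theorem regions_eq (grid : List String) : regionsBySlashes grid = regionsBySlashes_alt grid := by
  rcases eq_or_ne grid [] with rfl | hne
  · rfl
  · have hn : 0 < grid.length := List.length_pos_iff.mpr hne
    unfold regionsBySlashes regionsBySlashes_alt
    rw [if_neg hne]
    dsimp only
    rw [(shape_carve grid).1, ← carve_eq_map grid,
        outerCount_eq (by omega) (List.range (3 * grid.length)) (carve grid) 0 (shape_carve grid)]

-- ===== VERDICT (by name: the statement is the Claim_ definition above) =====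
theorem regionsBySlashes_spec : Claim_equal_regionsBySlashes := by
  intro grid _ _
  unfold Spec_regionsBySlashes
  exact regions_eq grid
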